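-- pv_equiv track=rewrite | github.com/jeffjeff4/mlCode | parallelFsdpV0.py | shard_indices
-- ===== SOURCE A (Python) =====
-- from typing import List, Dict, Tuple
--
-- def shard_indices(param_len: int, world_size: int) -> List[Tuple[int,int]]:
--     """
--     Return list of (start, end) indices (end exclusive) per rank.
--     Simple equal (floor) partition; last gets remainder.
--     """
--     base = param_len // world_size
--     rem = param_len % world_size
--     idxs = []
--     cur = 0
--     for r in range(world_size):
--         extra = 1 if r < rem else 0
--         s = cur
--         e = cur + base + extra
--         idxs.append((s,e))
--         cur = e
--     return idxs
-- ===== SOURCE B (Python) =====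
-- def shard_indices(param_len: int, world_size: int):
--     """Same partition, but each rank's (start, end) computed by closed form
--     instead of threading a running cursor."""
--     base, rem = divmod(param_len, world_size)
--     return [(r * base + min(r, rem), (r + 1) * base + min(r + 1, rem))
--             for r in range(world_size)]
-- ===== Notes on version B (the rewrite author's own statement) =====
-- stated objective: alternative
-- what changed: Replaces the sequential running-cursor loop with a per-rank closed form (start = r*base + min(r, rem), end = (r+1)*base + min(r+1, rem)), so each tuple is computed independently of the others.
import Mathlib
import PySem

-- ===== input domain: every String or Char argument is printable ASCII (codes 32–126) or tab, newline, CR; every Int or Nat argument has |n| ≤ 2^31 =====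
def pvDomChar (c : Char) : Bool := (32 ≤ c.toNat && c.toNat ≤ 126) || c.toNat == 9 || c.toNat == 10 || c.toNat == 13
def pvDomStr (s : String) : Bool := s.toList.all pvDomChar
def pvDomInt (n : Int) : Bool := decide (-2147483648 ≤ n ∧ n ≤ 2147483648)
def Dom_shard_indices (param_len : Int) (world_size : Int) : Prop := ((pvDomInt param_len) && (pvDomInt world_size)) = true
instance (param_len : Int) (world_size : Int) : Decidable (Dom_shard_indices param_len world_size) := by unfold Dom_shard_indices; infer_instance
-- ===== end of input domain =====

-- B replaces A's running-cursor loop by an independent closed form per rank (alternative decomposition, same cost).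


-- ===== PORT A =====
def shard_indices (param_len : Int) (world_size : Int) : List (Int × Int) :=
  let base := PySem.Int.floordiv param_len world_size
  let rem := PySem.Int.mod param_len world_size
  let st := (PySem.List.pyRange 0 world_size 1).foldl
    (fun (st : List (Int × Int) × Int) r =>
      let extra : Int := if r < rem then 1 else 0
      let s := st.2
      let e := st.2 + base + extra
      (st.1 ++ [(s, e)], e))
    ([], 0)
  st.1

-- ===== PORT B =====
def shard_indices_alt (param_len : Int) (world_size : Int) : List (Int × Int) :=
  let base := PySem.Int.floordiv param_len world_size
  let rem := PySem.Int.mod param_len world_size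
  (PySem.List.pyRange 0 world_size 1).map
    (fun r => (r * base + min r rem, (r + 1) * base + min (r + 1) rem))

-- ===== PRECONDITION & SPEC =====
-- Pre_ excludes world_size = 0, where Python A raises ZeroDivisionError.
def Pre_shard_indices (param_len : Int) (world_size : Int) : Prop := world_size ≠ 0
instance (param_len : Int) (world_size : Int) : Decidable (Pre_shard_indices param_len world_size) := by unfold Pre_shard_indices; infer_instance
def pvWitness_shard_indices : Int × Int := (10, 4)

def Spec_shard_indices (param_len : Int) (world_size : Int) (out : List (Int × Int)) : Prop := out = shard_indices_alt param_len world_size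
instance (param_len : Int) (world_size : Int) (out : List (Int × Int)) : Decidable (Spec_shard_indices param_len world_size out) := by unfold Spec_shard_indices; infer_instance

-- ===== CLAIM (what is proved, stated in full; the proofs are below) =====
def Claim_equal_shard_indices : Prop := ∀ (param_len : Int) (world_size : Int), Dom_shard_indices param_len world_size → Pre_shard_indices param_len world_size → Spec_shard_indices param_len world_size (shard_indices param_len world_size)

-- ===== LEMMAS AND PROOFS =====

-- Closed form of each rank's start index.
def pvG (base rem r : Int) : Int := r * base + min r rem

theorem pvG_step (base rem r : Int) :
    pvG base rem (r + 1) = pvG base rem r + base + (if r < rem then (1:Int) else 0) := by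
  unfold pvG
  rcases lt_or_ge r rem with h | h
  · rw [if_pos h, min_eq_left (by omega), min_eq_left (by omega)]; ring
  · rw [if_neg (not_lt.2 h), min_eq_right (by omega), min_eq_right (by omega)]; ring

-- Loop invariant: folding A's step over pyRange j n 1 with cursor pvG base rem j
-- appends exactly the closed-form tuples and leaves the cursor at pvG base rem n.
theorem pvLoop (base rem : Int) : ∀ (m : Nat) (j n : Int), (n - j).toNat = m →
    ∀ (acc : List (Int × Int)),
    (PySem.List.pyRange j n 1).foldl
      (fun (st : List (Int × Int) × Int) r =>
        let extra : Int := if r < rem then 1 else 0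
        let s := st.2
        let e := st.2 + base + extra
        (st.1 ++ [(s, e)], e))
      (acc, pvG base rem j)
    = (acc ++ (PySem.List.pyRange j n 1).map
        (fun r => (pvG base rem r, pvG base rem (r + 1))),
       pvG base rem (max j n)) := by
  intro m
  induction m with
  | zero =>
    intro j n h acc
    rw [PySem.List.pyRange_one_eq_nil (by omega)]
    simp [max_eq_left (show n ≤ j by omega)]
  | succ k ih =>
    intro j n h acc
    rw [PySem.List.pyRange_one_cons (by omega)]
    simp only [List.foldl_cons, List.map_cons]
    have hstep : pvG base rem j + base + (if j < rem then (1:Int) else 0) = pvG base rem (j + 1) :=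
      (pvG_step base rem j).symm
    rw [show (acc ++ [(pvG base rem j, pvG base rem j + base + (if j < rem then (1:Int) else 0))],
            pvG base rem j + base + (if j < rem then (1:Int) else 0))
          = (acc ++ [(pvG base rem j, pvG base rem (j + 1))], pvG base rem (j + 1)) by rw [hstep]]
    rw [ih (j + 1) n (by omega) (acc ++ [(pvG base rem j, pvG base rem (j + 1))])]
    simp [max_eq_right (show j ≤ n by omega), max_eq_right (show j + 1 ≤ n by omega)]

-- ===== VERDICT (by name: the statement is the Claim_ definition above) =====
theorem shard_indices_spec : Claim_equal_shard_indices := by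
  intro param_len world_size _ hpre
  unfold Spec_shard_indices shard_indices shard_indices_alt
  dsimp only
  set base := PySem.Int.floordiv param_len world_size with hbase
  set rem := PySem.Int.mod param_len world_size with hrem
  by_cases hws : 0 < world_size
  · have hrem0 : 0 ≤ rem := PySem.Int.mod_nonneg param_len hws
    have hloop := pvLoop base rem (world_size - 0).toNat 0 world_size rfl []
    have h0 : pvG base rem 0 = 0 := by unfold pvG; omega
    rw [h0, List.nil_append] at hloop
    rw [hloop]
    rfl
  · rw [PySem.List.pyRange_one_eq_nil (by omega)]
    simp
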